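-- pv_equiv track=rewrite | github.com/emiliebutez/Projet_TicTacToe | Tic_Tac_Toe.py | compterColonnes
-- ===== SOURCE A (Python) =====
-- size = 4
--
-- def compterColonnes(grille, symbole):
--     """Compte le nombre de fois où le symbole est sur
--      une colonne qui peut gagner"""
--     maximum = 0
--     for x in range(size) :
--         count = 0
--         for y in range(size) :
--             if grille[y][x] == symbole :
--                 count += 1
--             elif grille[y][x] == -symbole :
--                 count = 0
--                 break
--         maximum = max(maximum, count)
--
--     return maximum
-- ===== SOURCE B (Python) =====
-- size = 4
--
-- def compterColonnes(grille, symbole):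
--     """Single row-major pass: each column keeps a (count, alive) accumulator
--     that is advanced cell by cell as the rows stream past."""
--     state = [(0, True)] * size
--     for y in range(size):
--         row = grille[y]
--         new_state = []
--         for x, (count, alive) in enumerate(state):
--             cell = row[x]
--             if not alive:
--                 new_state.append((count, alive))
--             elif cell == symbole:
--                 new_state.append((count + 1, True))
--             elif cell == -symbole:
--                 new_state.append((0, False))
--             else:
--                 new_state.append((count, True))
--         state = new_state
--     return max(count for count, _ in state)
-- ===== Notes on version B (the rewrite author's own statement) =====
-- stated objective: alternative
-- what changed: B replaces A's column-by-column nested loops with a single row-major pass: every column carries a (count, alive) accumulator that each row advances cell by cell, and the answer is the max of the final counts; Pre_ requires a full 4x4 board (size = 4), excluding undersized grids where A usually raises IndexError and can only return 0 via early breaks, while B's row pass raises there.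
-- outside the precondition, e.g. on compterColonnes([[-1, -1, -1, -1], [0, 0, 0], [0, 0, 0], [0, 0, 0]], 1): A returns 0, B raises IndexError
import Mathlib
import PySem

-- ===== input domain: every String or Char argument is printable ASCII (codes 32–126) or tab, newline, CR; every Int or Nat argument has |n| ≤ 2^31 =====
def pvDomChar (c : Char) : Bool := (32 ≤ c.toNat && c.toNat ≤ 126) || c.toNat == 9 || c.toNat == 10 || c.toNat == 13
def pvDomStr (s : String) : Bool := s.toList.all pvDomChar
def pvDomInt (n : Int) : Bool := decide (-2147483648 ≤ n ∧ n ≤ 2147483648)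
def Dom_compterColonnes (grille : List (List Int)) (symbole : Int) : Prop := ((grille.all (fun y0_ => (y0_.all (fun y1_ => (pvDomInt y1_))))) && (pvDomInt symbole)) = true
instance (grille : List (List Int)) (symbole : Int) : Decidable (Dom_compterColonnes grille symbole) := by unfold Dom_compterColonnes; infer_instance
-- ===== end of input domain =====

-- B replaces A's column-by-column nested loops with one row-major streaming pass over
-- per-column (count, alive) accumulators; return-value equivalence on full 4x4 boards.

-- ===== PORT A =====
-- grille[y][x]; within Pre_ both indices are in range, so the default is never used
def pvCell (grille : List (List Int)) (y x : Int) : Int :=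
  PySem.List.pyGetD (PySem.List.pyGetD grille y []) x 0

-- inner 'for y in range(size)' loop with its count accumulator and break
def pvGoA (grille : List (List Int)) (symbole x : Int) : List Int → Int → Int
  | [], count => count
  | y :: ys, count =>
    if pvCell grille y x = symbole then pvGoA grille symbole x ys (count + 1)
    else if pvCell grille y x = -symbole then 0
    else pvGoA grille symbole x ys count

def compterColonnes (grille : List (List Int)) (symbole : Int) : Int :=
  (PySem.List.pyRange 0 4 1).foldl
    (fun maximum x => max maximum (pvGoA grille symbole x (PySem.List.pyRange 0 4 1) 0)) 0

-- ===== PORT B =====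
-- one cell advances one column's (count, alive) accumulator
def pvStepCell (symbole : Int) (st : Int × Bool) (cell : Int) : Int × Bool :=
  if st.2 = false then st
  else if cell = symbole then (st.1 + 1, true)
  else if cell = -symbole then (0, false)
  else (st.1, true)

-- the inner 'for x, (count, alive) in enumerate(state)' loop building new_state
def pvStepRow (symbole : Int) (st : List (Int × Bool)) (row : List Int) : List (Int × Bool) :=
  (PySem.List.enumerate st).map (fun p => pvStepCell symbole p.2 (PySem.List.pyGetD row p.1 0))

def compterColonnes_alt (grille : List (List Int)) (symbole : Int) : Int :=
  let final := (PySem.List.pyRange 0 4 1).foldl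
    (fun st y => pvStepRow symbole st (PySem.List.pyGetD grille y [])) (List.replicate 4 ((0 : Int), true))
  -- max(...) on a provably nonempty list under Pre_; getD totalises the port
  (PySem.List.max? (final.map (fun p => p.1)) (fun s => s)).getD 0

-- ===== PRECONDITION & SPEC =====
-- Pre_ requires a full 4x4 board (the module constant size = 4). It excludes undersized
-- grids, on which A almost always raises IndexError; A can still return 0 there when every
-- column hits an opponent cell before a missing one, while B's zip/max may raise (see cites).
def Pre_compterColonnes (grille : List (List Int)) (symbole : Int) : Prop :=
  4 ≤ grille.length ∧ ∀ row ∈ grille.take 4, 4 ≤ row.length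
instance (grille : List (List Int)) (symbole : Int) : Decidable (Pre_compterColonnes grille symbole) := by
  unfold Pre_compterColonnes; infer_instance

def pvWitness_compterColonnes : List (List Int) × Int :=
  ([[0,0,0,0],[0,1,0,0],[0,0,-1,0],[1,0,0,0]], 1)

def Spec_compterColonnes (grille : List (List Int)) (symbole : Int) (out : Int) : Prop := out = compterColonnes_alt grille symbole
instance (grille : List (List Int)) (symbole : Int) (out : Int) : Decidable (Spec_compterColonnes grille symbole out) := by unfold Spec_compterColonnes; infer_instance

-- ===== CLAIM (what is proved, stated in full; the proofs are below) =====
def Claim_equal_compterColonnes : Prop := ∀ (grille : List (List Int)) (symbole : Int), Dom_compterColonnes grille symbole → Pre_compterColonnes grille symbole → Spec_compterColonnes grille symbole (compterColonnes grille symbole)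

-- ===== LEMMAS AND PROOFS =====

-- the common per-column recursion both sides reduce to
def pvColScore (symbole : Int) : List Int → Int → Int
  | [], count => count
  | c :: cs, count =>
    if c = symbole then pvColScore symbole cs (count + 1)
    else if c = -symbole then 0
    else pvColScore symbole cs count

theorem pvGoA_eq_colScore (grille : List (List Int)) (symbole x : Int) :
    ∀ (ys : List Int) (count : Int),
      pvGoA grille symbole x ys count =
        pvColScore symbole (ys.map (fun y => pvCell grille y x)) count := by
  intro ys
  induction ys with
  | nil => intro count; simp [pvGoA, pvColScore]
  | cons y ys ih => intro count; simp [pvGoA, pvColScore, ih]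

theorem foldl_step_dead (symbole : Int) (c : Int) :
    ∀ (cells : List Int), cells.foldl (pvStepCell symbole) (c, false) = (c, false) := by
  intro cells
  induction cells with
  | nil => rfl
  | cons a t ih => simpa [pvStepCell] using ih

theorem foldl_step_eq_colScore (symbole : Int) :
    ∀ (cells : List Int) (count : Int),
      (cells.foldl (pvStepCell symbole) (count, true)).1 = pvColScore symbole cells count := by
  intro cells
  induction cells with
  | nil => intro count; simp [pvColScore]
  | cons a t ih =>
    intro count
    by_cases hs : a = symbole
    · simp [pvStepCell, pvColScore, hs, ih]
    · by_cases ho : a = -symbole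
      · have hne : ¬(-symbole = symbole) := ho ▸ hs
        simp [pvStepCell, pvColScore, hne, ho, foldl_step_dead]
      · simp [pvStepCell, pvColScore, hs, ho, ih]

theorem pvColScore_nonneg (symbole : Int) :
    ∀ (cells : List Int) (count : Int), 0 ≤ count → 0 ≤ pvColScore symbole cells count := by
  intro cells
  induction cells with
  | nil => intro count h; simpa [pvColScore] using h
  | cons a t ih =>
    intro count h
    unfold pvColScore
    split_ifs
    · exact ih _ (by omega)
    · exact le_refl 0
    · exact ih _ h

-- ===== VERDICT (by name: the statement is the Claim_ definition above) =====
theorem compterColonnes_spec : Claim_equal_compterColonnes := by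
  intro grille symbole _ hpre
  obtain ⟨hg, hrows⟩ := hpre
  -- destructure the first four rows and their first four cells
  obtain ⟨r0, g1, rfl⟩ : ∃ r0 g1, grille = r0 :: g1 := by
    cases grille with
    | nil => simp at hg
    | cons a t => exact ⟨a, t, rfl⟩
  obtain ⟨r1, g2, rfl⟩ : ∃ r1 g2, g1 = r1 :: g2 := by
    cases g1 with
    | nil => simp at hg
    | cons a t => exact ⟨a, t, rfl⟩
  obtain ⟨r2, g3, rfl⟩ : ∃ r2 g3, g2 = r2 :: g3 := by
    cases g2 with
    | nil => simp at hg
    | cons a t => exact ⟨a, t, rfl⟩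
  obtain ⟨r3, g4, rfl⟩ : ∃ r3 g4, g3 = r3 :: g4 := by
    cases g3 with
    | nil => simp at hg
    | cons a t => exact ⟨a, t, rfl⟩
  have hr0 : 4 ≤ r0.length := hrows r0 (by simp)
  have hr1 : 4 ≤ r1.length := hrows r1 (by simp)
  have hr2 : 4 ≤ r2.length := hrows r2 (by simp)
  have hr3 : 4 ≤ r3.length := hrows r3 (by simp)
  obtain ⟨a00, a01, a02, a03, t0, rfl⟩ : ∃ a b c d t, r0 = a :: b :: c :: d :: t := by
    match r0, hr0 with
    | a :: b :: c :: d :: t, _ => exact ⟨a, b, c, d, t, rfl⟩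
  obtain ⟨a10, a11, a12, a13, t1, rfl⟩ : ∃ a b c d t, r1 = a :: b :: c :: d :: t := by
    match r1, hr1 with
    | a :: b :: c :: d :: t, _ => exact ⟨a, b, c, d, t, rfl⟩
  obtain ⟨a20, a21, a22, a23, t2, rfl⟩ : ∃ a b c d t, r2 = a :: b :: c :: d :: t := by
    match r2, hr2 with
    | a :: b :: c :: d :: t, _ => exact ⟨a, b, c, d, t, rfl⟩
  obtain ⟨a30, a31, a32, a33, t3, rfl⟩ : ∃ a b c d t, r3 = a :: b :: c :: d :: t := by
    match r3, hr3 with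
    | a :: b :: c :: d :: t, _ => exact ⟨a, b, c, d, t, rfl⟩
  unfold Spec_compterColonnes compterColonnes compterColonnes_alt
  have h4 : PySem.List.pyRange 0 4 1 = [0, 1, 2, 3] := by decide
  rw [h4]
  simp only [List.foldl, List.replicate]
  simp [pvStepRow, PySem.List.enumerate_cons, PySem.List.enumerate_nil, PySem.List.pyGetD_ofNat']
  rw [pvGoA_eq_colScore, pvGoA_eq_colScore, pvGoA_eq_colScore, pvGoA_eq_colScore]
  simp only [List.map]
  simp [pvCell, PySem.List.pyGetD_ofNat']
  have h0 : 0 ≤ pvColScore symbole [a00, a10, a20, a30] 0 := pvColScore_nonneg _ _ _ le_rfl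
  rw [max_eq_right (le_trans h0 (le_max_left _ _))]
  have hB : ∀ c0 c1 c2 c3 : Int,
      (pvStepCell symbole (pvStepCell symbole (pvStepCell symbole (pvStepCell symbole ((0:Int), true) c0) c1) c2) c3).1
        = pvColScore symbole [c0, c1, c2, c3] 0 := by
    intro c0 c1 c2 c3
    simpa [List.foldl] using foldl_step_eq_colScore symbole [c0, c1, c2, c3] 0
  rw [hB, hB, hB, hB, PySem.List.max?_id_cons]
  simp only [List.foldl, Option.getD_some]
  simp [max_assoc]
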